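-- pv_equiv track=rewrite | github.com/lramirez89/proyectos_finalizados | materias_computacion/IntrCompBiologos/Practicas/Practica 4/practica4.py | listaDeAbs
-- ===== SOURCE A (Python) =====
-- def listaDeAbs(a):
-- 	if len(a)==0:
-- 		return []
--
-- 	res= listaDeAbs(a[:len(a)-1])
-- 	if a[len(a)-1]<0:
-- 		res.append(-a[len(a)-1])
-- 	else:
-- 		res.append(a[len(a)-1])
-- 	return res
-- ===== SOURCE B (Python) =====
-- def listaDeAbs(a):
--     res = []
--     for x in a:
--         res.append(-x if x < 0 else x)
--     return res
-- ===== Notes on version B (the rewrite author's own statement) =====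
-- stated objective: simpler
-- what changed: Replaced the quadratic tail-slicing recursion with a single iterative loop that appends |x| in original order.
import Mathlib
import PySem

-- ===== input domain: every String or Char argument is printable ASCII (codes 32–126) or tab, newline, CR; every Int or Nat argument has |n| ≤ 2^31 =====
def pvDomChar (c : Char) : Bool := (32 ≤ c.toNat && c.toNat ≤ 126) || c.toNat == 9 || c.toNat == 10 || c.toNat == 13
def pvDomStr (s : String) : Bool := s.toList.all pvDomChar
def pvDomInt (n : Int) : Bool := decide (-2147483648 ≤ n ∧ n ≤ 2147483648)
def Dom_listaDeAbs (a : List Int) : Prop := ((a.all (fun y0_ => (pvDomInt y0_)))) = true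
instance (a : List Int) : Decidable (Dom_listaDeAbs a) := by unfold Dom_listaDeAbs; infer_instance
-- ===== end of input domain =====

-- B replaces A's quadratic tail-slicing recursion by one linear iterative pass; same return value.


-- ===== PORT A =====
def listaDeAbs (a : List Int) : List Int :=
  if a.length = 0 then []
  else
    let res := listaDeAbs (PySem.List.slice a (some 0) (some ((a.length : Int) - 1)))
    let last := PySem.List.pyGetD a ((a.length : Int) - 1) 0
    if last < 0 then res ++ [-last] else res ++ [last]
termination_by a.length
decreasing_by
  rename_i h
  have ha : a ≠ [] := by intro e; subst e; simp at h
  simp [PySem.List.slice, PySem.List.clampIdx, ha]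
  omega

-- ===== PORT B =====
def listaDeAbs_alt (a : List Int) : List Int :=
  a.foldl (fun res x => res ++ [if x < 0 then -x else x]) []

-- ===== PRECONDITION & SPEC =====
def Spec_listaDeAbs (a : List Int) (out : List Int) : Prop := out = listaDeAbs_alt a
instance (a : List Int) (out : List Int) : Decidable (Spec_listaDeAbs a out) := by unfold Spec_listaDeAbs; infer_instance

-- ===== CLAIM (what is proved, stated in full; the proofs are below) =====
def Claim_equal_listaDeAbs : Prop := ∀ (a : List Int), Dom_listaDeAbs a → Spec_listaDeAbs a (listaDeAbs a)

-- ===== LEMMAS AND PROOFS =====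
theorem listaDeAbs_eq_map (a : List Int) :
    listaDeAbs a = a.map (fun x => if x < 0 then -x else x) := by
  induction a using List.reverseRecOn with
  | nil => rw [listaDeAbs.eq_def]; simp
  | append_singleton xs x ih =>
    rw [listaDeAbs.eq_def]
    have hlen : ((xs ++ [x]).length : Int) - 1 = (xs.length : Int) := by simp
    simp only [hlen]
    have hslice : PySem.List.slice (xs ++ [x]) (some 0) (some (xs.length : Int)) = xs := by
      simp
    have hget : PySem.List.pyGetD (xs ++ [x]) ((xs.length : Int)) 0 = x := by
      simp [PySem.List.pyGetD_natCast]
    simp [hslice, hget, ih]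
    split <;> simp

theorem listaDeAbs_alt_eq_map (a : List Int) :
    listaDeAbs_alt a = a.map (fun x => if x < 0 then -x else x) := by
  unfold listaDeAbs_alt
  rw [PySem.List.foldl_append_singleton_eq_map]
  simp

-- ===== VERDICT (by name: the statement is the Claim_ definition above) =====
theorem listaDeAbs_spec : Claim_equal_listaDeAbs := by
  intro a _
  unfold Spec_listaDeAbs
  rw [listaDeAbs_eq_map, listaDeAbs_alt_eq_map]
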